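-- pv_equiv track=rewrite | github.com/paukkle/BalChem | balchem/constituents.py | _count_atoms
-- ===== SOURCE A (Python) =====
-- def _count_atoms(sub_molecule: str):
--     i = len(sub_molecule) - 1
--     while True:
--         try:
--             int(sub_molecule[i])
--             i -= 1
--         except:
--             i += 1
--             break
--
--     try:
--         count = int(sub_molecule[i:])
--     except:
--         count = 1
--     atom = sub_molecule[:i]
--     return atom, count
-- ===== SOURCE B (Python) =====
-- def _count_atoms(sub_molecule: str):
--     # One forward pass. Digits are buffered in `pending`; any non-digit
--     # flushes the buffer into the atom, so at the end `pending` holds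
--     # exactly the trailing digit run.
--     atom = []
--     pending = []
--     for ch in sub_molecule:
--         if ch.isdigit():
--             pending.append(ch)
--         else:
--             atom += pending
--             atom.append(ch)
--             pending = []
--     return ''.join(atom), (int(''.join(pending)) if pending else 1)
-- ===== Notes on version B (the rewrite author's own statement) =====
-- stated objective: alternative
-- what changed: Replaces A's backward index scan with per-character int()/try-except and negative-index wraparound by a single forward left-to-right pass that buffers digits and flushes the buffer on every non-digit, so the trailing digit run is what remains buffered at the end; no index arithmetic, slicing or exception handling.
import Mathlib
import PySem

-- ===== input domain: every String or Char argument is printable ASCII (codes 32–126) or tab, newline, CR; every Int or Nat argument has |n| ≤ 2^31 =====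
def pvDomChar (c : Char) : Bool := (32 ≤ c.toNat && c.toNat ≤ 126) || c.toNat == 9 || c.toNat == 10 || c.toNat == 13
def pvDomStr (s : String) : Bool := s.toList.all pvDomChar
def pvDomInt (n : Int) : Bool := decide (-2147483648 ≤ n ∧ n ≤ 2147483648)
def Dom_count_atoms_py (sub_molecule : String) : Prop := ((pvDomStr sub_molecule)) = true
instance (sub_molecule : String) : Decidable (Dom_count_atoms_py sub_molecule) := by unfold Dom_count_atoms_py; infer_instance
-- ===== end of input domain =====

-- B replaces A's backward per-character int()/try-except index scan by a single forward pass
-- that buffers digits and flushes the buffer on every non-digit; return-value equivalence is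
-- proved on all printable-ASCII strings.


-- ===== PORT A =====
-- 'while True: try: int(sub_molecule[i]); i -= 1  except: i += 1; break'
-- i strictly decreases and the loop must stop by i = -len-1 (IndexError), so it runs at most
-- 2*len+2 iterations; the fuel parameter only makes this totality explicit, the 0-case is unreachable.
def countAtomsLoopA (cs : List Char) (fuel : Nat) (i : Int) : Int :=
  match fuel with
  | 0 => i + 1
  | f + 1 =>
    match PySem.List.pyGet? cs i with
    | some c =>
      match PySem.Int.ofStr? (String.ofList [c]) with   -- int(sub_molecule[i])
      | some _ => countAtomsLoopA cs f (i - 1)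
      | none => i + 1                                -- except: i += 1; break
    | none => i + 1                                  -- IndexError: i += 1; break

def count_atoms_py (sub_molecule : String) : String × Int :=
  let cs := sub_molecule.toList
  let i := countAtomsLoopA cs (2 * cs.length + 2) ((cs.length : Int) - 1)
  -- try: count = int(sub_molecule[i:]) except: count = 1
  let count := (PySem.Int.ofStr? (String.ofList (PySem.List.slice cs (some i) none))).getD 1
  let atom := String.ofList (PySem.List.slice cs none (some i))
  (atom, count)

-- ===== PORT B =====
-- the body of Source B's for-loop: buffer a digit, flush the buffer on a non-digit
def stepB (st : List Char × List Char) (ch : Char) : List Char × List Char :=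
  if PySem.Chars.isdigit ch then (st.1, st.2 ++ [ch]) else (st.1 ++ st.2 ++ [ch], [])

def count_atoms_py_alt (sub_molecule : String) : String × Int :=
  let st := sub_molecule.toList.foldl stepB ([], [])
  -- int(''.join(pending)) if pending else 1 ; the .getD 1 default is unreachable: a nonempty
  -- pending is a run of digit characters on which int() always succeeds.
  (String.ofList st.1,
    if st.2 ≠ [] then (PySem.Int.ofStr? (String.ofList st.2)).getD 1 else 1)

-- ===== PRECONDITION & SPEC =====
def Spec_count_atoms_py (sub_molecule : String) (out : String × Int) : Prop := out = count_atoms_py_alt sub_molecule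
instance (sub_molecule : String) (out : String × Int) : Decidable (Spec_count_atoms_py sub_molecule out) := by unfold Spec_count_atoms_py; infer_instance

-- ===== CLAIM (what is proved, stated in full; the proofs are below) =====
def Claim_equal_count_atoms_py : Prop := ∀ (sub_molecule : String), Dom_count_atoms_py sub_molecule → Spec_count_atoms_py sub_molecule (count_atoms_py sub_molecule)

-- ===== LEMMAS AND PROOFS =====

-- the A-loop's per-index test: True iff sub_molecule[i] exists and single-char int() succeeds on it
def pvD (cs : List Char) (i : Int) : Bool :=
  (PySem.List.pyGet? cs i).elim false (fun c => (PySem.Int.ofStr? (String.ofList [c])).isSome)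

-- single-char int() succeeds exactly on '0'..'9', checked for every code point below 127
theorem pv_digit_key : ∀ n < 127, (PySem.Int.ofStr? (String.ofList [Char.ofNat n])).isSome
    = ("0123456789".toList.contains (Char.ofNat n)) := by decide

theorem pv_isSome (c : Char) (h : pvDomChar c = true) :
    (PySem.Int.ofStr? (String.ofList [c])).isSome = "0123456789".toList.contains c := by
  have h127 : c.toNat < 127 := by
    simp [pvDomChar] at h
    omega
  have := pv_digit_key c.toNat h127
  rwa [Char.ofNat_toNat] at this

-- str.isdigit on one character agrees with '0'..'9' membership, for every code point below 127
theorem pv_isdigit_key : ∀ n < 127, PySem.Chars.isdigit (Char.ofNat n)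
    = ("0123456789".toList.contains (Char.ofNat n)) := by decide

theorem pv_isdigit (c : Char) (h : pvDomChar c = true) :
    PySem.Chars.isdigit c = "0123456789".toList.contains c := by
  have h127 : c.toNat < 127 := by
    simp [pvDomChar] at h
    omega
  have := pv_isdigit_key c.toNat h127
  rwa [Char.ofNat_toNat] at this

theorem pv_loop_stop (cs : List Char) (fuel : Nat) (i : Int) (h : pvD cs i = false)
    (hf : 0 < fuel) : countAtomsLoopA cs fuel i = i + 1 := by
  obtain ⟨f, rfl⟩ : ∃ f, fuel = f + 1 := ⟨fuel - 1, by omega⟩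
  cases hg : PySem.List.pyGet? cs i with
  | none => conv_lhs => rw [countAtomsLoopA, hg]
  | some c =>
    unfold pvD at h
    rw [hg] at h
    simp only [Option.elim] at h
    cases ho : PySem.Int.ofStr? (String.ofList [c]) with
    | none =>
      conv_lhs => rw [countAtomsLoopA, hg]
      simp [ho]
    | some v => rw [ho] at h; simp at h

theorem pv_loop_skip (cs : List Char) (t : Nat) : ∀ (fuel : Nat) (i : Int), t ≤ fuel →
    (∀ s : Nat, s < t → pvD cs (i - s) = true) →
    countAtomsLoopA cs fuel i = countAtomsLoopA cs (fuel - t) (i - t) := by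
  induction t with
  | zero => simp
  | succ t ih =>
    intro fuel i hf h
    have h0 : pvD cs i = true := by simpa using h 0 (by omega)
    obtain ⟨f, rfl⟩ : ∃ f, fuel = f + 1 := ⟨fuel - 1, by omega⟩
    have step : countAtomsLoopA cs (f + 1) i = countAtomsLoopA cs f (i - 1) := by
      cases hg : PySem.List.pyGet? cs i with
      | none => exfalso; simp [pvD, hg] at h0
      | some c =>
        unfold pvD at h0
        rw [hg] at h0
        simp only [Option.elim] at h0
        cases ho : PySem.Int.ofStr? (String.ofList [c]) with
        | none => rw [ho] at h0; simp at h0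
        | some v =>
          conv_lhs => rw [countAtomsLoopA, hg]
          simp [ho]
    rw [step, ih f (i - 1) (by omega) (fun s hs => by
      have := h (s + 1) (by omega)
      have he : i - ((s : Int) + 1) = i - 1 - s := by ring
      push_cast at this
      rwa [he] at this)]
    congr 1
    · omega
    · push_cast; ring

-- the number of trailing digits
def pvK (cs : List Char) : Nat :=
  (cs.reverse.takeWhile (fun c => "0123456789".toList.contains c)).length

theorem pv_k_le (cs : List Char) : pvK cs ≤ cs.length := by
  have := (List.takeWhile_prefix (l := cs.reverse) (fun c => "0123456789".toList.contains c)).length_le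
  simpa [pvK] using this

theorem pv_rev_getElem (cs : List Char) (s : Nat) (hs : s < cs.length) :
    PySem.List.pyGet? cs ((cs.length : Int) - 1 - s) = some (cs.reverse[s]'(by simpa using hs)) := by
  have he : ((cs.length : Int) - 1 - s) = ((cs.length - 1 - s : Nat) : Int) := by omega
  rw [he, PySem.List.pyGet?_natCast]
  rw [List.getElem_reverse]
  rw [List.getElem?_eq_getElem (by omega)]

theorem pv_digit_at (cs : List Char) (hall : ∀ c ∈ cs, pvDomChar c = true)
    (s : Nat) (hs : s < pvK cs) : pvD cs ((cs.length : Int) - 1 - s) = true := by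
  have hsn : s < cs.length := lt_of_lt_of_le hs (pv_k_le cs)
  have hg := pv_rev_getElem cs s hsn
  rw [show pvD cs ((cs.length : Int) - 1 - s)
      = (PySem.Int.ofStr? (String.ofList [cs.reverse[s]'(by simpa using hsn)])).isSome by
    simp [pvD, hg]]
  have hsrev : s < cs.reverse.length := by simpa using hsn
  have hmem : cs.reverse[s] ∈ cs := by
    have : cs.reverse[s] ∈ cs.reverse := List.getElem_mem hsrev
    simpa using this
  rw [pv_isSome _ (hall _ hmem)]
  -- the s-th element of the reverse is in the takeWhile prefix, hence a digit
  have hpre := List.takeWhile_prefix (l := cs.reverse) (fun c => "0123456789".toList.contains c)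
  have hsk : s < (cs.reverse.takeWhile (fun c => "0123456789".toList.contains c)).length := hs
  have hget : (cs.reverse.takeWhile (fun c => "0123456789".toList.contains c))[s] = cs.reverse[s] :=
    List.IsPrefix.getElem hpre hsk
  have := List.mem_takeWhile_imp (List.getElem_mem hsk)
  rwa [hget] at this

theorem pv_rev_getElem? (cs : List Char) (s : Nat) (hs : s < cs.length) :
    PySem.List.pyGet? cs ((cs.length : Int) - 1 - s) = cs.reverse[s]? := by
  rw [pv_rev_getElem cs s hs, List.getElem?_eq_getElem (by simpa using hs)]

theorem pv_stop_at (cs : List Char) (hall : ∀ c ∈ cs, pvDomChar c = true)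
    (hk : pvK cs < cs.length) : pvD cs ((cs.length : Int) - 1 - (pvK cs)) = false := by
  unfold pvD
  rw [pv_rev_getElem? cs (pvK cs) hk]
  -- the pvK-th element of the reverse is the head of the dropWhile part, which fails the test
  have h1 : cs.reverse[pvK cs]?
      = (cs.reverse.dropWhile (fun c => "0123456789".toList.contains c)).head? := by
    conv_lhs => rw [← List.takeWhile_append_dropWhile
      (p := fun c => "0123456789".toList.contains c) (l := cs.reverse)]
    rw [List.getElem?_append_right (by simp [pvK])]
    simp [pvK, List.head?_eq_getElem?]
  rw [h1]
  cases hdwe : cs.reverse.dropWhile (fun c => "0123456789".toList.contains c) with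
  | nil => rfl
  | cons a l =>
    have hne : cs.reverse.dropWhile (fun c => "0123456789".toList.contains c) ≠ [] := by
      rw [hdwe]; simp
    have hpa := List.head_dropWhile_not (fun c => "0123456789".toList.contains c) hne
    have hmem : a ∈ cs := by
      have ha : a ∈ cs.reverse.dropWhile (fun c => "0123456789".toList.contains c) := by
        rw [hdwe]; exact List.mem_cons_self
      have := (List.dropWhile_sublist (l := cs.reverse)
        (p := fun c => "0123456789".toList.contains c)).mem ha
      simpa using this
    have hheada : (cs.reverse.dropWhile (fun c => "0123456789".toList.contains c)).head hne = a := by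
      have q := List.head?_eq_head (l := cs.reverse.dropWhile (fun c => "0123456789".toList.contains c)) hne
      have q2 : (cs.reverse.dropWhile (fun c => "0123456789".toList.contains c)).head? = some a := by
        rw [hdwe]; rfl
      rw [q] at q2
      exact Option.some.inj q2
    rw [hheada] at hpa
    simp only [List.head?_cons, Option.elim]
    rw [pv_isSome a (hall _ hmem)]
    exact hpa

theorem pv_all_digits (cs : List Char) (hk : pvK cs = cs.length) :
    ∀ c ∈ cs, ("0123456789".toList.contains c) = true := by
  intro c hc
  have hpre := List.takeWhile_prefix (l := cs.reverse) (fun c => "0123456789".toList.contains c)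
  have heq : cs.reverse.takeWhile (fun c => "0123456789".toList.contains c) = cs.reverse := by
    apply List.IsPrefix.eq_of_length hpre
    simpa [pvK] using hk
  have hcr : c ∈ cs.reverse := by simpa using hc
  rw [← heq] at hcr
  exact List.mem_takeWhile_imp hcr

theorem pv_loop_value (cs : List Char) (hall : ∀ c ∈ cs, pvDomChar c = true) :
    countAtomsLoopA cs (2 * cs.length + 2) ((cs.length : Int) - 1)
      = if pvK cs = cs.length then -(cs.length : Int) else ((cs.length - pvK cs : Nat) : Int) := by
  by_cases hk : pvK cs = cs.length
  · -- every character is a digit: the scan wraps through negative indices down to i = -len-1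
    rw [if_pos hk]
    have hdig : ∀ (i : Int), PySem.List.pyGet? cs i ≠ none → pvD cs i = true := by
      intro i hi
      cases hg : PySem.List.pyGet? cs i with
      | none => exact absurd hg hi
      | some c =>
        have hmem : c ∈ cs := PySem.List.mem_of_pyGet?_eq_some cs hg
        simp only [pvD, hg, Option.elim]
        rw [pv_isSome _ (hall _ hmem)]
        exact pv_all_digits cs hk c hmem
    have hskip := pv_loop_skip cs (2 * cs.length) (2 * cs.length + 2) ((cs.length : Int) - 1)
      (by omega)
      (fun s hs => by
        apply hdig
        rw [Ne, PySem.List.pyGet?_eq_none_iff]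
        simp only [PySem.Raise.InRange]
        push_cast
        omega)
    rw [hskip]
    have hstop : pvD cs ((cs.length : Int) - 1 - (2 * cs.length : Nat)) = false := by
      have hnone : PySem.List.pyGet? cs ((cs.length : Int) - 1 - ((2 * cs.length : Nat) : Int)) = none := by
        rw [PySem.List.pyGet?_eq_none_iff]
        simp only [PySem.Raise.InRange]
        push_cast
        omega
      unfold pvD
      rw [hnone]
      rfl
    rw [pv_loop_stop cs _ _ hstop (by omega)]
    push_cast
    ring
  · -- a non-digit is reached at index len-1-k, the loop returns len-k
    have hklt : pvK cs < cs.length := lt_of_le_of_ne (pv_k_le cs) hk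
    rw [if_neg hk]
    have hskip := pv_loop_skip cs (pvK cs) (2 * cs.length + 2) ((cs.length : Int) - 1)
      (by have := pv_k_le cs; omega)
      (fun s hs => pv_digit_at cs hall s hs)
    rw [hskip]
    have hstop := pv_stop_at cs hall hklt
    rw [pv_loop_stop cs _ _ hstop (by have := pv_k_le cs; omega)]
    push_cast [Nat.cast_sub (le_of_lt hklt)]
    ring

theorem pv_slices (cs : List Char) :
    (PySem.List.slice cs none (some (if pvK cs = cs.length then -(cs.length : Int) else ((cs.length - pvK cs : Nat) : Int)))
        = cs.take (cs.length - pvK cs))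
    ∧ (PySem.List.slice cs (some (if pvK cs = cs.length then -(cs.length : Int) else ((cs.length - pvK cs : Nat) : Int))) none
        = cs.drop (cs.length - pvK cs)) := by
  by_cases hk : pvK cs = cs.length
  · rw [if_pos hk]
    rcases Nat.eq_zero_or_pos cs.length with h0 | hpos
    · have : cs = [] := List.eq_nil_of_length_eq_zero h0
      subst this
      constructor <;> simp [PySem.List.slice]
    · constructor
      · rw [PySem.List.slice_to_neg_natCast cs cs.length hpos]
        rw [hk]
      · rw [PySem.List.slice_from_neg_natCast cs cs.length hpos]
        rw [hk]
  · rw [if_neg hk]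
    exact ⟨PySem.List.slice_to_natCast cs _, PySem.List.slice_from_natCast cs _⟩

-- appending a digit extends the trailing run; a non-digit resets it
theorem pvK_append_digit (cs : List Char) (c : Char)
    (hd : ("0123456789".toList.contains c) = true) : pvK (cs ++ [c]) = pvK cs + 1 := by
  unfold pvK
  rw [List.reverse_append]
  simp only [List.reverse_singleton, List.singleton_append, List.takeWhile_cons]
  rw [if_pos hd]
  rfl

theorem pvK_append_nondigit (cs : List Char) (c : Char)
    (hd : ¬ ("0123456789".toList.contains c) = true) : pvK (cs ++ [c]) = 0 := by
  unfold pvK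
  rw [List.reverse_append]
  simp only [List.reverse_singleton, List.singleton_append, List.takeWhile_cons]
  rw [if_neg hd]
  rfl

-- B's forward pass ends with (everything before the trailing digit run, the trailing digit run)
theorem pv_foldB (cs : List Char) (hall : ∀ c ∈ cs, pvDomChar c = true) :
    cs.foldl stepB ([], [])
      = (cs.take (cs.length - pvK cs), cs.drop (cs.length - pvK cs)) := by
  induction cs using List.reverseRecOn with
  | nil => simp [pvK]
  | append_singleton cs c ih =>
    have hall' : ∀ x ∈ cs, pvDomChar x = true := fun x hx => hall x (by simp [hx])
    have hc : pvDomChar c = true := hall c (by simp)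
    rw [List.foldl_append, ih hall', List.foldl_cons, List.foldl_nil]
    unfold stepB
    dsimp only
    rw [pv_isdigit c hc]
    have hk := pv_k_le cs
    by_cases hd : ("0123456789".toList.contains c) = true
    · rw [if_pos hd, pvK_append_digit cs c hd]
      have h1 : (cs ++ [c]).length - (pvK cs + 1) = cs.length - pvK cs := by
        simp only [List.length_append, List.length_singleton]
        omega
      rw [h1, List.take_append_of_le_length (by omega),
        List.drop_append_of_le_length (by omega)]
    · rw [if_neg hd, pvK_append_nondigit cs c hd]
      have h1 : (cs ++ [c]).length - 0 = (cs ++ [c]).length := by omega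
      rw [h1, List.take_of_length_le (le_refl _), List.drop_of_length_le (le_refl _)]
      rw [List.take_append_drop]

-- ===== VERDICT (by name: the statement is the Claim_ definition above) =====
theorem count_atoms_py_spec : Claim_equal_count_atoms_py := by
  intro s hDom
  unfold Spec_count_atoms_py
  have hall : ∀ c ∈ s.toList, pvDomChar c = true := by
    have := hDom
    unfold Dom_count_atoms_py pvDomStr at this
    simpa [List.all_eq_true] using this
  set cs := s.toList with hcs
  simp only [count_atoms_py, count_atoms_py_alt, ← hcs]
  rw [pv_loop_value cs hall, (pv_slices cs).1, (pv_slices cs).2, pv_foldB cs hall]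
  by_cases hd : cs.drop (cs.length - pvK cs) = []
  · rw [hd]
    simp
    decide
  · simp only [if_pos (show cs.drop (cs.length - pvK cs) ≠ [] from hd)]
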